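-- pv_equiv track=rewrite | github.com/Postigic/code-dump-lmao | Python/sorting_algorithm_visualiser/core/constants.py | _median_of_three_killer
-- ===== SOURCE A (Python) =====
-- def _median_of_three_killer(n):
--     # McIlroy's algorithm (pretty cooolll i think?)
--     arr = list(range(1, n + 1))
--     candidate = [0] * n
--     k = n // 2
--
--     for i in range(n):
--         if i % 2 == 0:
--             candidate[i] = i
--         else:
--             candidate[i] = k + (i // 2)
--
--     for i in range(0, n - 1, 2):
--         arr[candidate[i]], arr[candidate[i + 1]] = arr[candidate[i + 1]], arr[candidate[i]]
--
--     return arr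
-- ===== SOURCE B (Python) =====
-- def _median_of_three_killer(n):
--     # Direct per-position construction (no swaps, no mutation): even slot p holds
--     # n//2 + p//2 + 1; an odd slot's value is found by chasing the swap chain
--     # q -> 2*(q - n//2) back to its origin below n//2.
--     k = n // 2
--     out = []
--     for p in range(n):
--         if p % 2 == 0:
--             out.append(k + p // 2 + 1)
--         else:
--             q = p
--             while q >= k:
--                 q = 2 * (q - k)
--             out.append(q + 1)
--     return out
-- ===== Notes on version B (the rewrite author's own statement) =====
-- stated objective: alternative
-- what changed: B abandons A's swap-based in-place permutation (candidate table plus a pass of n//2 swaps) and constructs each output element directly: even positions get n//2 + p//2 + 1 in closed form, odd positions by chasing the swap chain q -> 2*(q - n//2) back to its origin, so no array is ever mutated.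
import Mathlib
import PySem

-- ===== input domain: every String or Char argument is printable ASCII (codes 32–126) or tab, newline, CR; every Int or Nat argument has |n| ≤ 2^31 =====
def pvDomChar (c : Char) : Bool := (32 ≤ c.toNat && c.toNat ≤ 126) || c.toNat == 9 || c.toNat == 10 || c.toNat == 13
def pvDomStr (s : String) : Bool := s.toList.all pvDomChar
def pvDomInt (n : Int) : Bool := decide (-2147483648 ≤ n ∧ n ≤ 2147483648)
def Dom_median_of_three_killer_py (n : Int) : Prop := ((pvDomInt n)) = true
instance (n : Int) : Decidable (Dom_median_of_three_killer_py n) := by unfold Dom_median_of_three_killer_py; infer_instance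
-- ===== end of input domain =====

-- B replaces A's in-place swap permutation (candidate index table + a pass of n//2 swaps)
-- by a direct per-position construction: even slots by a closed formula, odd slots by
-- chasing the swap chain q -> 2*(q - n//2) back to its origin (objective: alternative).

-- Python tuple swap 'arr[a], arr[b] = arr[b], arr[a]' (A only swaps in-range indices,
-- so pyGetD's default is never used).
def pySwap (arr : List Int) (a b : Int) : List Int :=
  (arr.set a.toNat (PySem.List.pyGetD arr b 0)).set b.toNat (PySem.List.pyGetD arr a 0)

-- ===== PORT A =====
def median_of_three_killer_py (n : Int) : List Int :=
  let arr := PySem.List.pyRange 1 (n + 1) 1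
  let candidate0 : List Int := List.replicate n.toNat 0
  let k := PySem.Int.floordiv n 2
  let candidate := (PySem.List.pyRange 0 n 1).foldl
      (fun c i => c.set i.toNat
        (if PySem.Int.mod i 2 = 0 then i else k + PySem.Int.floordiv i 2)) candidate0
  (PySem.List.pyRange 0 (n - 1) 2).foldl
      (fun a i => pySwap a (PySem.List.pyGetD candidate i 0)
                           (PySem.List.pyGetD candidate (i + 1) 0)) arr

-- ===== PORT B =====
-- hand port of B's 'while q >= k: q = 2*(q - k)' with fuel q.toNat + 1: exact whenever the
-- Python loop terminates within that many steps, which it does on every call B makes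
-- (odd p with p < 2*(n//2): q strictly decreases each iteration).
def chainB : Nat → Int → Int → Int
  | 0, _, q => q
  | f + 1, k, q => if k ≤ q then chainB f k (2 * (q - k)) else q

def median_of_three_killer_py_alt (n : Int) : List Int :=
  let k := PySem.Int.floordiv n 2
  (PySem.List.pyRange 0 n 1).foldl
    (fun out p =>
      out ++ [if PySem.Int.mod p 2 = 0 then k + PySem.Int.floordiv p 2 + 1
              else chainB (p.toNat + 1) k p + 1]) []

-- ===== PRECONDITION & SPEC =====
def Spec_median_of_three_killer_py (n : Int) (out : List Int) : Prop := out = median_of_three_killer_py_alt n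
instance (n : Int) (out : List Int) : Decidable (Spec_median_of_three_killer_py n out) := by unfold Spec_median_of_three_killer_py; infer_instance

-- ===== CLAIM (what is proved, stated in full; the proofs are below) =====
def Claim_equal_median_of_three_killer_py : Prop := ∀ (n : Int), Dom_median_of_three_killer_py n → Spec_median_of_three_killer_py n (median_of_three_killer_py n)

-- ===== LEMMAS AND PROOFS =====

-- the mathematical origin-chasing chain (guarded so it is total)
def gN (K : Nat) (q : Nat) : Nat :=
  if h : K ≤ q ∧ q < 2 * K then gN K (2 * (q - K)) else q
termination_by q
decreasing_by omega

theorem gN_of_lt (K q : Nat) (h : q < K) : gN K q = q := by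
  rw [gN]; simp [Nat.not_le_of_lt h]

theorem gN_step (K q : Nat) (h1 : K ≤ q) (h2 : q < 2 * K) : gN K q = gN K (2 * (q - K)) := by
  rw [gN]; simp [h1, h2]

-- B's fuel loop computes gN on the calls B makes
theorem chainB_eq_gN (K : Nat) : ∀ (f q : Nat), q < 2 * K → q + 1 ≤ f →
    chainB f (K : Int) (q : Int) = ((gN K q : Nat) : Int) := by
  intro f
  induction f with
  | zero => intro q _ hf; omega
  | succ f ih =>
      intro q hq hf
      by_cases h : K ≤ q
      · have he : (2 * ((q : Int) - K)) = ((2 * (q - K) : Nat) : Int) := by push_cast; omega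
        rw [chainB, if_pos (by exact_mod_cast h), he,
          ih (2 * (q - K)) (by omega) (by omega), gN_step K q h hq]
      · rw [chainB, if_neg (by exact_mod_cast h), gN_of_lt K q (by omega)]

-- the state of A's swap loop after j swaps, as a function of the position p
def invF (K j p : Nat) : Int :=
  if p % 2 = 0 ∧ p / 2 < j then (K : Int) + (p / 2 : Nat) + 1
  else if p < K + j then ((gN K p : Nat) : Int) + 1
  else (p : Int) + 1

theorem set_map_range (N : Nat) (f : Nat → Int) (i : Nat) (v : Int) (hi : i < N) :
    ((List.range N).map f).set i v = (List.range N).map (fun p => if p = i then v else f p) := by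
  have _ := hi
  apply List.ext_getElem (by simp)
  intro m h1 h2
  simp only [List.getElem_set, List.getElem_map, List.getElem_range]
  by_cases hm : i = m <;> simp [hm, eq_comm]

theorem pyGetD_map_range_nat (N : Nat) (f : Nat → Int) (i : Nat) (hi : i < N) :
    PySem.List.pyGetD ((List.range N).map f) ((i : Nat) : Int) 0 = f i := by
  have _ := hi
  rw [PySem.List.pyGetD_natCast, PySem.List.getD_map_range _ _ _ _ hi]

-- one swap advances the invariant
theorem swap_step (N K j : Nat) (hN : 2 * K ≤ N) (hj : j < K) :
    pySwap ((List.range N).map (invF K j)) ((2 * j : Nat) : Int) ((K + j : Nat) : Int)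
      = (List.range N).map (invF K (j + 1)) := by
  have h2j : 2 * j < N := by omega
  have hkj : K + j < N := by omega
  have hne : 2 * j ≠ K + j := by omega
  unfold pySwap
  rw [pyGetD_map_range_nat N _ _ h2j, pyGetD_map_range_nat N _ _ hkj]
  have g1 : invF K j (2 * j) = ((gN K (2 * j) : Nat) : Int) + 1 := by
    unfold invF
    rw [if_neg (by omega), if_pos (by omega)]
  have g2 : invF K j (K + j) = ((K + j : Nat) : Int) + 1 := by
    unfold invF
    rw [if_neg (by omega), if_neg (by omega)]
  rw [g1, g2, Int.toNat_natCast, Int.toNat_natCast,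
    set_map_range N _ _ _ h2j, set_map_range N _ _ _ hkj]
  apply List.map_congr_left
  intro p hp
  have hpN : p < N := List.mem_range.mp hp
  by_cases hA : p = K + j
  · subst hA
    rw [if_pos rfl]
    unfold invF
    rw [if_neg (by omega), if_pos (by omega), gN_step K (K + j) (by omega) (by omega)]
    congr 3
    omega
  · rw [if_neg hA]
    by_cases hB : p = 2 * j
    · subst hB
      rw [if_pos rfl]
      unfold invF
      rw [if_pos (by omega)]
      push_cast
      omega
    · rw [if_neg hB]
      unfold invF
      by_cases c1 : p % 2 = 0 ∧ p / 2 < j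
      · rw [if_pos c1, if_pos ⟨c1.1, by omega⟩]
      · by_cases c1' : p % 2 = 0 ∧ p / 2 < j + 1
        · exact absurd (by omega : p = 2 * j) hB
        · rw [if_neg c1, if_neg c1']
          by_cases c2 : p < K + j
          · rw [if_pos c2, if_pos (by omega)]
          · rw [if_neg c2, if_neg (by omega)]

-- the whole swap loop establishes the invariant at time K
theorem loop_inv (N K : Nat) (hN : 2 * K ≤ N) : ∀ (j : Nat), j ≤ K →
    (List.range j).foldl (fun a (jj : Nat) => pySwap a (2 * (jj : Int)) ((K : Int) + (jj : Int)))
        ((List.range N).map (invF K 0))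
      = (List.range N).map (invF K j) := by
  intro j
  induction j with
  | zero => intro _; rfl
  | succ j ih =>
      intro hj
      rw [List.range_succ, List.foldl_append, ih (by omega), List.foldl_cons, List.foldl_nil]
      have e1 : 2 * (j : Int) = ((2 * j : Nat) : Int) := by push_cast; ring
      have e2 : (K : Int) + (j : Int) = ((K + j : Nat) : Int) := by push_cast; ring
      rw [e1, e2, swap_step N K j hN (by omega)]

theorem median_of_three_killer_py_eq (n : Int) :
    median_of_three_killer_py n = median_of_three_killer_py_alt n := by
  by_cases hn : n ≤ 0
  · unfold median_of_three_killer_py median_of_three_killer_py_alt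
    rw [PySem.List.pyRange_one_eq_nil (by omega : n ≤ 0),
      PySem.List.pyRange_one_eq_nil (by omega : n + 1 ≤ 1),
      PySem.List.pyRange_of_pos 0 (n - 1) (by norm_num : (0 : Int) < 2), if_neg (by omega)]
    simp
  · -- n ≥ 1
    set N := n.toNat with hNdef
    have hnN : n = (N : Int) := by omega
    have hk : PySem.Int.floordiv n 2 = n / 2 :=
      PySem.Int.floordiv_eq_ediv_of_pos (by norm_num)
    set K := (n / 2).toNat with hKdef
    have hkK : n / 2 = (K : Int) := by omega
    have hNK : N = 2 * K ∨ N = 2 * K + 1 := by omega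
    -- B's side: a map over range N
    have hB : median_of_three_killer_py_alt n
        = (List.range N).map (fun p : Nat =>
            if p % 2 = 0 then (K : Int) + (p / 2 : Nat) + 1
            else chainB (p + 1) (K : Int) (p : Int) + 1) := by
      simp only [median_of_three_killer_py_alt, hk, hkK]
      rw [PySem.List.pyRange_one 0 n, show n - 0 = n from by ring, hnN,
        Int.toNat_natCast]
      rw [List.foldl_map, PySem.List.foldl_append_singleton_eq_map, List.nil_append]
      apply List.map_congr_left
      intro p hp
      have hpN : p < N := List.mem_range.mp hp
      have hz : (0 : Int) + (p : Int) = ((p : Nat) : Int) := by ring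
      rw [hz]
      have hm : PySem.Int.mod ((p : Nat) : Int) 2 = ((p % 2 : Nat) : Int) :=
        PySem.Int.mod_natCast p 2
      have hd : PySem.Int.floordiv ((p : Nat) : Int) 2 = ((p / 2 : Nat) : Int) :=
        PySem.Int.floordiv_natCast p 2
      rw [hm, hd, Int.toNat_natCast]
      by_cases hpar : p % 2 = 0
      · rw [if_pos (by exact_mod_cast hpar), if_pos hpar]
      · rw [if_neg (by exact_mod_cast hpar), if_neg hpar]
    -- A's side
    have hA : median_of_three_killer_py n = (List.range N).map (invF K K) := by
      simp only [median_of_three_killer_py, hk, hkK]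
      -- the candidate table is a map over range N
      have hcand : (PySem.List.pyRange 0 n 1).foldl
          (fun c i => c.set i.toNat
            (if PySem.Int.mod i 2 = 0 then i else (K : Int) + PySem.Int.floordiv i 2))
          (List.replicate n.toNat 0)
          = (List.range N).map (fun i : Nat =>
              if i % 2 = 0 then (i : Int) else (K : Int) + ((i / 2 : Nat) : Int)) := by
        rw [PySem.List.pyRange_one 0 n, show n - 0 = n from by ring, hnN, Int.toNat_natCast,
          List.foldl_map]
        simp only [zero_add]
        have : ∀ (m : Nat) (c : List Int), m ≤ c.length →
            (List.range m).foldl (fun c (i : Nat) => c.set ((i : Int)).toNat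
              (if PySem.Int.mod ((i : Nat) : Int) 2 = 0 then ((i : Nat) : Int)
               else (K : Int) + PySem.Int.floordiv ((i : Nat) : Int) 2)) c
            = (List.range m).map (fun i : Nat =>
                if i % 2 = 0 then (i : Int) else (K : Int) + ((i / 2 : Nat) : Int))
              ++ c.drop m := by
          intro m
          induction m with
          | zero => intro c _; simp
          | succ m ihm =>
              intro c hc
              rw [List.range_succ, List.foldl_append, List.foldl_cons, List.foldl_nil,
                ihm c (by omega), List.map_append]
              have hlt : m < c.length := by omega
              rw [Int.toNat_natCast, List.set_append, List.length_map, List.length_range]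
              rw [if_neg (by omega), Nat.sub_self, List.drop_eq_getElem_cons hlt,
                List.set_cons_zero, List.append_assoc]
              congr 2
              have hm' : PySem.Int.mod ((m : Nat) : Int) 2 = ((m % 2 : Nat) : Int) :=
                PySem.Int.mod_natCast m 2
              have hd' : PySem.Int.floordiv ((m : Nat) : Int) 2 = ((m / 2 : Nat) : Int) :=
                PySem.Int.floordiv_natCast m 2
              rw [hm', hd']
              by_cases hpar : m % 2 = 0
              · rw [if_pos (by exact_mod_cast hpar)]
                simp [hpar]
              · rw [if_neg (by exact_mod_cast hpar)]
                simp [hpar]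
        rw [this N _ (by simp), List.drop_of_length_le (by simp),
          List.append_nil]
      rw [hcand]
      -- the arr start is the invariant at time 0
      have harr : PySem.List.pyRange 1 (n + 1) 1 = (List.range N).map (invF K 0) := by
        rw [PySem.List.pyRange_one 1 (n + 1), show n + 1 - 1 = n from by ring, hnN,
          Int.toNat_natCast]
        apply List.map_congr_left
        intro p hp
        have hpN : p < N := List.mem_range.mp hp
        unfold invF
        rw [if_neg (by omega)]
        by_cases hc : p < K + 0
        · rw [if_pos hc, gN_of_lt K p (by omega)]
          ring
        · rw [if_neg hc]; ring
      -- the step-2 range: K iterations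
      have hrange : PySem.List.pyRange 0 (n - 1) 2
          = (List.range K).map (fun j : Nat => (0 : Int) + 2 * (j : Int)) := by
        rw [PySem.List.pyRange_of_pos 0 (n - 1) (by norm_num : (0 : Int) < 2)]
        by_cases h1 : n ≤ 1
        · have hK0 : K = 0 := by omega
          rw [if_neg (by omega), hK0]
        · rw [if_pos (by omega)]
          congr 2
          omega
      rw [hrange, harr, List.foldl_map]
      -- resolve each candidate lookup and apply the invariant
      have hcongr : (List.range K).foldl
          (fun a (j : Nat) => pySwap a
            (PySem.List.pyGetD ((List.range N).map (fun i : Nat =>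
                if i % 2 = 0 then (i : Int) else (K : Int) + ((i / 2 : Nat) : Int)))
              ((0 : Int) + 2 * (j : Int)) 0)
            (PySem.List.pyGetD ((List.range N).map (fun i : Nat =>
                if i % 2 = 0 then (i : Int) else (K : Int) + ((i / 2 : Nat) : Int)))
              ((0 : Int) + 2 * (j : Int) + 1) 0))
          ((List.range N).map (invF K 0))
          = (List.range K).foldl
              (fun a (j : Nat) => pySwap a (2 * (j : Int)) ((K : Int) + (j : Int)))
              ((List.range N).map (invF K 0)) := by
        apply PySem.List.foldl_congr_mem
        intro acc j hj
        have hjK : j < K := List.mem_range.mp hj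
        have e1 : (0 : Int) + 2 * (j : Int) = ((2 * j : Nat) : Int) := by push_cast; ring
        have e2 : ((2 * j : Nat) : Int) + 1 = ((2 * j + 1 : Nat) : Int) := by
          push_cast; ring
        rw [e1, e2, pyGetD_map_range_nat N _ _ (by omega),
          pyGetD_map_range_nat N _ _ (by omega)]
        rw [if_pos (by omega), if_neg (by omega)]
        have hj2 : (2 * j + 1) / 2 = j := by omega
        rw [hj2]
        congr 1
      rw [hcongr, loop_inv N K (by omega) K (le_refl K)]
    -- combine, pointwise
    rw [hA, hB]
    apply List.map_congr_left
    intro p hp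
    have hpN : p < N := List.mem_range.mp hp
    by_cases hpar : p % 2 = 0
    · rw [if_pos hpar]
      unfold invF
      by_cases hh : p / 2 < K
      · rw [if_pos ⟨hpar, hh⟩]
      · -- p = 2 * K (only when N = 2 * K + 1)
        have hp2K : p = 2 * K := by omega
        rw [if_neg (by omega), if_neg (by omega)]
        push_cast
        omega
    · rw [if_neg hpar]
      have hplt : p < 2 * K := by omega
      unfold invF
      rw [if_neg (by omega), if_pos (by omega),
        chainB_eq_gN K (p + 1) p hplt (le_refl _)]

-- ===== VERDICT (by name: the statement is the Claim_ definition above) =====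
theorem median_of_three_killer_py_spec : Claim_equal_median_of_three_killer_py := by
  intro n _
  exact median_of_three_killer_py_eq n
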